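-- pv_equiv track=rewrite | github.com/Yash9988/self-learn | leetcode/2406.py | minGroups_alt
-- ===== SOURCE A (Python) =====
-- def minGroups_alt(intervals: list[list[int]]) -> int:
--     A = []                                              # Initialise a list
--     for a, b in intervals:                              # Iterate through all the intervals
--         A.append([a, 1])                                # Append the start of the interval with an "occupied" flag
--         A.append([b + 1, -1])                           # Append the end of the interval with a "released" flag
--
--     res = cur = 0                                       # Initialise result and current counter
--     for a, diff in sorted(A):                           # Sort and iterate through the list we created
--         cur += diff                                     # Accumulate the difference in the current counter
--         res = max(res, cur)                             # Update the result counter to hold the maximum value so far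
--     return res                                          # Return the result
-- ===== SOURCE B (Python) =====
-- def minGroups_alt(intervals: list[list[int]]) -> int:
--     # Brute force, no sorting: the answer is the largest number of intervals
--     # covering some start point s, counted as #{a <= s} - #{b < s}.
--     res = 0
--     for s, _ in intervals:
--         cur = 0
--         for a, b in intervals:
--             if a <= s:
--                 cur += 1
--             if b < s:
--                 cur -= 1
--         res = max(res, cur)
--     return res
-- ===== Notes on version B (the rewrite author's own statement) =====
-- stated objective: alternative
-- what changed: Replaces A's build-events/sort/sweep-line (max running sum over the sorted +1/-1 event list) with a sort-free quadratic brute force: for each interval start s count #(starts <= s) - #(ends < s) and take the maximum.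
import Mathlib
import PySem

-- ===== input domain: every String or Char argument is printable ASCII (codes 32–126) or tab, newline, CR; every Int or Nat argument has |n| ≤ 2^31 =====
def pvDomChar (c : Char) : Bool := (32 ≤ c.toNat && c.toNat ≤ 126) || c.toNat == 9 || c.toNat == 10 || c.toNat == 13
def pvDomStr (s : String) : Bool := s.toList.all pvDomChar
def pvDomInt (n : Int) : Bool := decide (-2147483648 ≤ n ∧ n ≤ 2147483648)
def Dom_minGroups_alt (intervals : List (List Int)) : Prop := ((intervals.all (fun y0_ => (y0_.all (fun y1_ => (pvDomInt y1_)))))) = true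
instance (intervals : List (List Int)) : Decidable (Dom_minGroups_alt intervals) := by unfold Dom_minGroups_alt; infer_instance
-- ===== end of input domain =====

-- B replaces A's build-events/sort/sweep with a sort-free quadratic scan: the answer is the
-- maximum, over the start s of each interval, of #(starts ≤ s) − #(ends < s).  Objective:
-- alternative (no sorting, different algorithm; not claimed faster).

-- ===== PORT A =====
def minGroups_alt (intervals : List (List Int)) : Int :=
  let A := intervals.foldl (fun acc iv =>
    match iv with
    | [a, b] => acc ++ [[a, (1 : Int)], [b + 1, (-1 : Int)]]
    | _ => acc) ([] : List (List Int))   -- Python raises ValueError on a non-pair; excluded by Pre_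
  let p := (PySem.List.sorted A (fun x => x) false).foldl
    (fun (p : Int × Int) ev =>
      match ev with
      | [_, diff] => (p.1 + diff, max p.2 (p.1 + diff))
      | _ => p) ((0 : Int), (0 : Int))   -- every event is a pair; fallback unreachable
  p.2

-- ===== PORT B =====
def minGroups_alt_alt (intervals : List (List Int)) : Int :=
  intervals.foldl (fun res iv =>
    if iv.length = 2 then   -- `for s, _ in intervals`: Python raises ValueError on a non-pair; excluded by Pre_
      let s := iv.getD 0 0
      let cur := intervals.foldl (fun cur iv2 =>
        if iv2.length = 2 then   -- `for a, b in intervals`: same unpacking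
          let a := iv2.getD 0 0
          let b := iv2.getD 1 0
          let cur := if a ≤ s then cur + 1 else cur
          if b < s then cur - 1 else cur
        else cur) (0 : Int)
      max res cur
    else res) (0 : Int)

-- ===== PRECONDITION & SPEC =====
-- Pre_ excludes exactly the inputs on which the Pythons raise: both A and B unpack each
-- interval as `a, b`, a ValueError unless every inner list has length 2.
def Pre_minGroups_alt (intervals : List (List Int)) : Prop :=
  ∀ iv ∈ intervals, iv.length = 2
instance (intervals : List (List Int)) : Decidable (Pre_minGroups_alt intervals) := by
  unfold Pre_minGroups_alt; infer_instance
def pvWitness_minGroups_alt : List (List Int) := [[1, 3], [2, 5], [5, 5]]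

def Spec_minGroups_alt (intervals : List (List Int)) (out : Int) : Prop := out = minGroups_alt_alt intervals
instance (intervals : List (List Int)) (out : Int) : Decidable (Spec_minGroups_alt intervals out) := by unfold Spec_minGroups_alt; infer_instance

-- ===== CLAIM (what is proved, stated in full; the proofs are below) =====
def Claim_equal_minGroups_alt : Prop := ∀ (intervals : List (List Int)), Dom_minGroups_alt intervals → Pre_minGroups_alt intervals → Spec_minGroups_alt intervals (minGroups_alt intervals)

-- ===== LEMMAS AND PROOFS =====

-- Abstraction layer: events as pairs (coordinate, ±1).
def pvEv (intervals : List (List Int)) : List (Int × Int) :=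
  intervals.flatMap (fun iv => match iv with | [a, b] => [(a, 1), (b + 1, -1)] | _ => [])

def pvStarts (E : List (Int × Int)) : List Int := (E.filter (fun e => e.2 == 1)).map Prod.fst

def pvW (E : List (Int × Int)) (s : Int) : Int :=
  (E.countP (fun e => e.2 == 1 && decide (e.1 ≤ s)) : Int)
    - (E.countP (fun e => e.2 == -1 && decide (e.1 ≤ s)) : Int)

def pvMps : List Int → Int
  | [] => 0
  | d :: t => max 0 (d + pvMps t)

def pvG (E : List (Int × Int)) : Int := ((pvStarts E).map (pvW E)).foldl max 0

def pvR (a b : Int × Int) : Prop := a.1 < b.1 ∨ (a.1 = b.1 ∧ a.2 ≤ b.2)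

-- Python's lexicographic order on two-element int lists.
theorem pv_le2 (x d y e : Int) : (([x, d] : List Int) ≤ [y, e]) ↔ (x < y ∨ (x = y ∧ d ≤ e)) := by
  constructor
  · intro h
    rcases lt_trichotomy x y with h1 | h1 | h1
    · exact Or.inl h1
    · subst h1
      refine Or.inr ⟨rfl, ?_⟩
      by_contra hde
      exact absurd (List.Lex.cons (List.Lex.rel (by omega))) (not_lt.mpr h)
    · exact absurd (List.Lex.rel h1) (not_lt.mpr h)
  · intro h
    rcases h with h | ⟨rfl, h⟩
    · exact le_of_lt (List.Lex.rel h)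
    · rcases eq_or_lt_of_le h with rfl | h
      · exact le_refl _
      · exact le_of_lt (List.Lex.cons (List.Lex.rel h))

theorem pvMps_nonneg (l : List Int) : 0 ≤ pvMps l := by
  cases l <;> simp [pvMps]

theorem pvMaxInit (l : List Int) (i j : Int) :
    l.foldl max (max i j) = max i (l.foldl max j) := by
  induction l generalizing j with
  | nil => rfl
  | cons a t ih =>
    simp only [List.foldl_cons]
    rw [show max (max i j) a = max i (max j a) by omega, ih]

theorem pvMaxAdd (l : List Int) (c i : Int) :
    (l.map (fun v => c + v)).foldl max (c + i) = c + l.foldl max i := by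
  induction l generalizing i with
  | nil => rfl
  | cons a t ih =>
    simp only [List.map_cons, List.foldl_cons]
    rw [show max (c + i) (c + a) = c + max i a by omega, ih]

theorem pvMaxInitLe (l : List Int) (i : Int) : i ≤ l.foldl max i := by
  induction l generalizing i with
  | nil => simp
  | cons a t ih => exact le_trans (le_max_left i a) (ih _)

theorem pvMaxMemLe (l : List Int) (i a : Int) (h : a ∈ l) : a ≤ l.foldl max i := by
  induction l generalizing i with
  | nil => simp at h
  | cons b t ih =>
    rcases List.mem_cons.mp h with rfl | h
    · exact le_trans (le_max_right i a) (pvMaxInitLe _ _)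
    · exact ih _ h

theorem pvMaxShift (l : List Int) (c : Int) (hc : c ≤ 0) :
    (l.map (fun v => c + v)).foldl max 0 = max 0 (c + l.foldl max 0) := by
  conv_lhs => rw [show (0 : Int) = max 0 (c + 0) by omega]
  rw [pvMaxInit, pvMaxAdd]

-- The sweep loop computes max-prefix-sum.
theorem pvSweep (ds : List Int) (c r : Int) :
    (ds.foldl (fun (p : Int × Int) d => (p.1 + d, max p.2 (p.1 + d))) (c, max r c)).2
      = max r (c + pvMps ds) := by
  induction ds generalizing c r with
  | nil => simp [pvMps]
  | cons d t ih =>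
    simp only [List.foldl_cons]
    rw [ih (c + d) (max r c)]
    simp only [pvMps]
    omega

-- Core: on a lex-sorted ±1 event list, max-prefix-sum = max weight over start points.
theorem pvCore (E : List (Int × Int)) (h1 : ∀ e ∈ E, e.2 = 1 ∨ e.2 = -1)
    (h2 : E.Pairwise pvR) : pvMps (E.map Prod.snd) = pvG E := by
  induction E with
  | nil => simp [pvMps, pvG, pvStarts]
  | cons e t ih =>
    have he := h1 e (List.mem_cons_self ..)
    have ht1 : ∀ x ∈ t, x.2 = 1 ∨ x.2 = -1 := fun x hx => h1 x (List.mem_cons_of_mem _ hx)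
    have hR : ∀ x ∈ t, pvR e x := (List.pairwise_cons.mp h2).1
    have ihv := ih ht1 (List.pairwise_cons.mp h2).2
    have hle : ∀ s ∈ pvStarts t, e.1 ≤ s := by
      intro s hs
      obtain ⟨y, hy, rfl⟩ := List.mem_map.mp hs
      obtain ⟨hyt, hy1⟩ := List.mem_filter.mp hy
      rcases hR y hyt with h | ⟨h, _⟩
      · exact le_of_lt h
      · exact le_of_eq h
    have hWcons : ∀ s, e.1 ≤ s → pvW (e :: t) s = e.2 + pvW t s := by
      intro s hs
      rcases he with h | h <;> simp [pvW, h, hs] <;> omega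
    rcases he with h | h
    · -- head is a start event (e.2 = 1)
      have hstarts : pvStarts (e :: t) = e.1 :: pvStarts t := by
        simp [pvStarts, h]
      have hu0 : 0 ≤ pvW t e.1 := by
        have hz : t.countP (fun y => y.2 == -1 && decide (y.1 ≤ e.1)) = 0 := by
          rw [List.countP_eq_zero]
          intro y hy
          rcases hR y hy with hlt | ⟨_, hle2⟩
          · simp only [Bool.and_eq_true, beq_iff_eq, decide_eq_true_eq, not_and]
            intro _; omega
          · simp only [Bool.and_eq_true, beq_iff_eq, decide_eq_true_eq, not_and]
            intro hy2; omega
        simp [pvW, hz]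
      have hF : pvW (e :: t) e.1 = 1 + pvW t e.1 := by
        have := hWcons e.1 le_rfl; rw [h] at this; exact this
      have hmap : (pvStarts t).map (pvW (e :: t))
          = ((pvStarts t).map (pvW t)).map (fun v => 1 + v) := by
        rw [List.map_map]
        exact List.map_congr_left (fun s hs => by simp [hWcons s (hle s hs), h])
      have hub : pvW t e.1 ≤ ((pvStarts t).map (pvW t)).foldl max 0 := by
        rcases eq_or_lt_of_le hu0 with heq | hpos
        · rw [← heq]; exact pvMaxInitLe _ _
        · apply pvMaxMemLe
          have hex : ∃ y ∈ t, (fun y => y.2 == 1 && decide (y.1 ≤ e.1)) y = true := by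
            by_contra hc
            push Not at hc
            have : t.countP (fun y => y.2 == 1 && decide (y.1 ≤ e.1)) = 0 :=
              List.countP_eq_zero.mpr (fun y hy => by simp [hc y hy])
            have h2' : 0 ≤ (t.countP (fun y => y.2 == -1 && decide (y.1 ≤ e.1)) : Int) := by positivity
            simp only [pvW, this] at hpos
            omega
          obtain ⟨y, hy, hp⟩ := hex
          simp only [Bool.and_eq_true, beq_iff_eq, decide_eq_true_eq] at hp
          have hy1 : y.1 = e.1 := by
            rcases hR y hy with hlt | ⟨heq, _⟩
            · omega
            · omega
          refine List.mem_map.mpr ⟨e.1, ?_, rfl⟩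
          refine List.mem_map.mpr ⟨y, List.mem_filter.mpr ⟨hy, by simp [hp.1]⟩, hy1⟩
      calc pvMps ((e :: t).map Prod.snd)
          = max 0 (1 + pvMps (t.map Prod.snd)) := by simp [pvMps, h]
        _ = 1 + pvMps (t.map Prod.snd) := by have := pvMps_nonneg (t.map Prod.snd); omega
        _ = 1 + pvG t := by rw [ihv]
        _ = pvG (e :: t) := by
            refine Eq.symm ?_
            rw [pvG, hstarts, List.map_cons, List.foldl_cons, hmap, hF]
            rw [show max 0 (1 + pvW t e.1) = 1 + pvW t e.1 by omega]
            rw [pvMaxAdd]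
            rw [show pvW t e.1 = max (pvW t e.1) 0 by omega, pvMaxInit]
            rw [pvG]
            omega
    · -- head is an end event (e.2 = -1)
      have hstarts : pvStarts (e :: t) = pvStarts t := by
        simp [pvStarts, h]
      have hmap : (pvStarts t).map (pvW (e :: t))
          = ((pvStarts t).map (pvW t)).map (fun v => (-1) + v) := by
        rw [List.map_map]
        exact List.map_congr_left (fun s hs => by simp [hWcons s (hle s hs), h])
      calc pvMps ((e :: t).map Prod.snd)
          = max 0 ((-1) + pvMps (t.map Prod.snd)) := by simp [pvMps, h]
        _ = max 0 ((-1) + pvG t) := by rw [ihv]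
        _ = pvG (e :: t) := by
            refine Eq.symm ?_
            rw [pvG, hstarts, hmap, pvMaxShift _ _ (by omega), pvG]

-- Bridges from the ports to the abstraction layer.
theorem pvEv_snd (ivs : List (List Int)) : ∀ e ∈ pvEv ivs, e.2 = 1 ∨ e.2 = -1 := by
  intro e he
  rw [pvEv, List.mem_flatMap] at he
  obtain ⟨l, _, he⟩ := he
  rcases l with _ | ⟨a, l⟩
  · simp at he
  rcases l with _ | ⟨b, l⟩
  · simp at he
  rcases l with _ | ⟨c, l⟩
  · simp at he
    rcases he with rfl | rfl <;> simp
  · simp at he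

theorem pvBuild (ivs : List (List Int)) (hpre : Pre_minGroups_alt ivs) (acc : List (List Int)) :
    ivs.foldl (fun acc iv => match iv with
      | [a, b] => acc ++ [[a, (1 : Int)], [b + 1, (-1 : Int)]]
      | _ => acc) acc = acc ++ (pvEv ivs).map (fun e => [e.1, e.2]) := by
  induction ivs generalizing acc with
  | nil => simp [pvEv]
  | cons iv t ih =>
    have h2 := hpre iv (List.mem_cons_self ..)
    have hpt : Pre_minGroups_alt t := fun x hx => hpre x (List.mem_cons_of_mem _ hx)
    rcases iv with _ | ⟨a, iv⟩; · simp at h2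
    rcases iv with _ | ⟨b, iv⟩; · simp at h2
    rcases iv with _ | ⟨c, iv⟩
    · simp only [List.foldl_cons]
      rw [ih hpt]
      simp [pvEv]
    · simp at h2
theorem pvPairsMap (S : List (List Int)) (hsh : ∀ l ∈ S, ∃ x d : Int, l = [x, d])
    (hp : S.Pairwise (· ≤ ·)) :
    (S.map (fun l => (l.getD 0 0, l.getD 1 0))).Pairwise pvR := by
  rw [List.pairwise_map]
  refine List.Pairwise.imp_of_mem ?_ hp
  intro a b ha hb hab
  obtain ⟨x, d, rfl⟩ := hsh a ha
  obtain ⟨y, e, rfl⟩ := hsh b hb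
  have := (pv_le2 x d y e).mp hab
  simpa [pvR] using this

theorem pvSweepMap (S : List (List Int)) (hsh : ∀ l ∈ S, ∃ x d : Int, l = [x, d])
    (init : Int × Int) :
    S.foldl (fun (p : Int × Int) ev => match ev with
      | [_, diff] => (p.1 + diff, max p.2 (p.1 + diff))
      | _ => p) init
    = ((S.map (fun l => (l.getD 0 0, l.getD 1 0))).map Prod.snd).foldl
        (fun (p : Int × Int) d => (p.1 + d, max p.2 (p.1 + d))) init := by
  induction S generalizing init with
  | nil => rfl
  | cons l t ih =>
    obtain ⟨x, d, rfl⟩ := hsh l (List.mem_cons_self ..)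
    simp only [List.map_cons, List.foldl_cons, List.getD]
    exact ih (fun y hy => hsh y (List.mem_cons_of_mem _ hy)) _

theorem pvG_perm (E E' : List (Int × Int)) (hp : E.Perm E') : pvG E = pvG E' := by
  have hw : ∀ s, pvW E s = pvW E' s := fun s => by rw [pvW, pvW, hp.countP_eq, hp.countP_eq]
  have hs : (pvStarts E).Perm (pvStarts E') := ((hp.filter _).map _)
  rw [pvG, pvG,
    show (pvStarts E).map (pvW E) = (pvStarts E).map (pvW E') from
      List.map_congr_left (fun s _ => hw s)]
  exact (hs.map (pvW E')).foldl_eq 0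

-- A's port equals pvG of the event list.
theorem pvA (ivs : List (List Int)) (hpre : Pre_minGroups_alt ivs) :
    minGroups_alt ivs = pvG (pvEv ivs) := by
  unfold minGroups_alt
  rw [pvBuild ivs hpre []]
  simp only [List.nil_append]
  set Ab := (pvEv ivs).map (fun e => [e.1, e.2]) with hAb
  set S := PySem.List.sorted Ab (fun x => x) false with hS
  have hperm : S.Perm Ab := PySem.List.sorted_perm ..
  have hpair : S.Pairwise (fun a b => a ≤ b) := by
    rw [hS]
    have h := PySem.List.sorted_pairwise Ab (fun x : List Int => x)
    convert h using 2
  have hsh : ∀ l ∈ S, ∃ x d : Int, l = [x, d] ∧ (d = 1 ∨ d = -1) := by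
    intro l hl
    have hm : l ∈ Ab := hperm.mem_iff.mp hl
    rw [hAb] at hm
    obtain ⟨e, he, rfl⟩ := List.mem_map.mp hm
    exact ⟨e.1, e.2, rfl, pvEv_snd ivs e he⟩
  have hsh' : ∀ l ∈ S, ∃ x d : Int, l = [x, d] := by
    intro l hl
    obtain ⟨x, d, h, _⟩ := hsh l hl
    exact ⟨x, d, h⟩
  rw [pvSweepMap S hsh' (0, 0)]
  set SP := S.map (fun l => (l.getD 0 0, l.getD 1 0)) with hSP
  have hinit : ((0 : Int), (0 : Int)) = ((0 : Int), max 0 0) := by norm_num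
  rw [hinit, pvSweep (SP.map Prod.snd) 0 0]
  have hsnd : ∀ e ∈ SP, e.2 = 1 ∨ e.2 = -1 := by
    intro e he
    rw [hSP] at he
    obtain ⟨l, hl, rfl⟩ := List.mem_map.mp he
    obtain ⟨x, d, rfl, hd⟩ := hsh l hl
    simpa using hd
  have hcore := pvCore SP hsnd (pvPairsMap S hsh' hpair)
  have hSPperm : SP.Perm (pvEv ivs) := by
    have h1 : SP.Perm (Ab.map (fun l => (l.getD 0 0, l.getD 1 0))) := hperm.map _
    have h2 : Ab.map (fun l => (l.getD 0 0, l.getD 1 0)) = pvEv ivs := by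
      rw [hAb, List.map_map]
      conv_rhs => rw [← List.map_id (pvEv ivs)]
      exact List.map_congr_left (fun e _ => by simp)
    rwa [h2] at h1
  rw [hcore, pvG_perm SP (pvEv ivs) hSPperm]
  have hnn : (0 : Int) ≤ pvG (pvEv ivs) := pvMaxInitLe _ 0
  omega

-- B's port: the inner loop computes pvW, the outer loop the running maximum.
theorem pvStarts_ev (ivs : List (List Int)) (hpre : Pre_minGroups_alt ivs) :
    pvStarts (pvEv ivs) = ivs.map (fun iv => iv.getD 0 0) := by
  induction ivs with
  | nil => simp [pvEv, pvStarts]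
  | cons iv t ih =>
    have h2 := hpre iv (List.mem_cons_self ..)
    have hpt : Pre_minGroups_alt t := fun x hx => hpre x (List.mem_cons_of_mem _ hx)
    rcases iv with _ | ⟨a, iv⟩; · simp at h2
    rcases iv with _ | ⟨b, iv⟩; · simp at h2
    rcases iv with _ | ⟨c, iv⟩
    · simp only [pvEv, List.flatMap_cons] at *
      simp only [pvStarts, List.filter_append, List.map_append] at *
      rw [ih hpt]
      simp
    · simp at h2

theorem pvInner (full : List (List Int)) (hpre : Pre_minGroups_alt full) (s : Int) :
    ∀ c : Int,
    full.foldl (fun cur iv2 =>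
      if iv2.length = 2 then
        let a := iv2.getD 0 0
        let b := iv2.getD 1 0
        let cur := if a ≤ s then cur + 1 else cur
        if b < s then cur - 1 else cur
      else cur) c = c + pvW (pvEv full) s := by
  induction full with
  | nil => intro c; simp [pvEv, pvW]
  | cons iv t ih =>
    intro c
    have h2 := hpre iv (List.mem_cons_self ..)
    have hpt : Pre_minGroups_alt t := fun x hx => hpre x (List.mem_cons_of_mem _ hx)
    rcases iv with _ | ⟨a, iv⟩; · simp at h2
    rcases iv with _ | ⟨b, iv⟩; · simp at h2
    rcases iv with _ | ⟨c', iv⟩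
    · rw [List.foldl_cons, ih hpt]
      have hW : pvW (pvEv ([a, b] :: t)) s
          = (if a ≤ s then (1 : Int) else 0) + (if b < s then (-1 : Int) else 0)
            + pvW (pvEv t) s := by
        simp only [pvEv, List.flatMap_cons, List.cons_append, List.nil_append, pvW]
        rw [List.countP_cons, List.countP_cons, List.countP_cons, List.countP_cons]
        norm_num
        split_ifs <;> push_cast <;> omega
      rw [hW]
      simp only [List.length_cons, List.length_nil, List.getD_cons_zero, List.getD_cons_succ]
      split_ifs <;> omega
    · simp at h2

theorem pvB (ivs : List (List Int)) (hpre : Pre_minGroups_alt ivs) :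
    minGroups_alt_alt ivs = pvG (pvEv ivs) := by
  unfold minGroups_alt_alt
  rw [pvG, pvStarts_ev ivs hpre, List.map_map]
  have main : ∀ (outer : List (List Int)), (∀ iv ∈ outer, iv.length = 2) → ∀ r : Int,
      outer.foldl (fun res iv =>
        if iv.length = 2 then
          let s := iv.getD 0 0
          let cur := ivs.foldl (fun cur iv2 =>
            if iv2.length = 2 then
              let a := iv2.getD 0 0
              let b := iv2.getD 1 0
              let cur := if a ≤ s then cur + 1 else cur
              if b < s then cur - 1 else cur
            else cur) (0 : Int)
          max res cur
        else res) r
      = (outer.map (pvW (pvEv ivs) ∘ fun iv => iv.getD 0 0)).foldl max r := by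
    intro outer
    induction outer with
    | nil => intro _ r; rfl
    | cons iv t ih =>
      intro ho r
      have h2 := ho iv (List.mem_cons_self ..)
      have hot : ∀ x ∈ t, x.length = 2 := fun x hx => ho x (List.mem_cons_of_mem _ hx)
      rcases iv with _ | ⟨a, iv⟩; · simp at h2
      rcases iv with _ | ⟨b, iv⟩; · simp at h2
      rcases iv with _ | ⟨c, iv⟩
      · rw [List.map_cons, List.foldl_cons, List.foldl_cons, ih hot]
        congr 1
        simp only [List.length_cons, List.length_nil, List.getD_cons_zero,
          Function.comp_apply]
        rw [pvInner ivs hpre a 0]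
        norm_num
      · simp at h2
  exact main ivs hpre 0

-- ===== VERDICT (by name: the statement is the Claim_ definition above) =====
theorem minGroups_alt_spec : Claim_equal_minGroups_alt := by
  intro ivs _ hpre
  unfold Spec_minGroups_alt
  rw [pvA ivs hpre, pvB ivs hpre]
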